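-- pv_equiv track=rewrite | github.com/My-Aespa/SQA-LAB | source/print_promotion.py | print_promotion
-- ===== SOURCE A (Python) =====
-- MINIMUM = 500
--
-- MIDRANGE: int = 700
--
-- MAXIMUM = 1200
--
-- FREE_ICECREAM = "Free ice cream cone = "
--
-- FREE_CAKE = "Free chocolate cake = "
--
-- NO_GIFT = "Thank you and see you next time"
--
-- def print_promotion(total_cost):
--     temp_cost = total_cost
--     num_icecream = 0
--     num_cake = 0
--
--     # Check if total_cost is more than minimum requirement
--     if total_cost >= MINIMUM:
--         while temp_cost != 0:
--             if temp_cost // MAXIMUM >= 1: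
--                 num_icecream += temp_cost // MAXIMUM
--                 num_cake += temp_cost // MAXIMUM
--                 temp_cost = temp_cost - (num_icecream * MAXIMUM)
--             elif temp_cost // MIDRANGE >= 1:
--                 num_cake += temp_cost // MIDRANGE
--                 temp_cost = temp_cost - (num_cake * MIDRANGE)
--             elif temp_cost // MINIMUM >= 1:
--                 num_icecream += temp_cost // MINIMUM
--                 temp_cost = temp_cost - (num_icecream * MAXIMUM)
--             else:
--                 temp_cost = 0
--     else:
--         # no gift
--         return (NO_GIFT)
--
--     if total_cost >= MAXIMUM:
--         return (FREE_ICECREAM + str(num_icecream) + " and " + FREE_CAKE + str(num_cake))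
--     elif total_cost >= MIDRANGE:
--         return (FREE_CAKE + str(num_cake))
--     else:
--         return (FREE_ICECREAM + str(num_icecream))
-- ===== SOURCE B (Python) =====
-- MINIMUM = 500
-- MIDRANGE: int = 700
-- MAXIMUM = 1200
-- FREE_ICECREAM = "Free ice cream cone = "
-- FREE_CAKE = "Free chocolate cake = "
-- NO_GIFT = "Thank you and see you next time"
--
-- def print_promotion(total_cost):
--     if total_cost < MINIMUM:
--         return NO_GIFT
--     if total_cost >= MAXIMUM:
--         q = total_cost // MAXIMUM
--         r = total_cost % MAXIMUM
--         num_icecream = q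
--         num_cake = q
--         if r >= MIDRANGE:
--             num_cake += 1
--         elif r >= MINIMUM:
--             num_icecream += 1
--         return FREE_ICECREAM + str(num_icecream) + " and " + FREE_CAKE + str(num_cake)
--     if total_cost >= MIDRANGE:
--         return FREE_CAKE + str(1)
--     return FREE_ICECREAM + str(1)
-- ===== Notes on version B (the rewrite author's own statement) =====
-- stated objective: simpler
-- what changed: Replaces A's stateful while loop on a shrinking temp_cost by direct divmod arithmetic: one // and one % by MAXIMUM and a remainder case split give the gift counts in closed form.
import Mathlib
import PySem

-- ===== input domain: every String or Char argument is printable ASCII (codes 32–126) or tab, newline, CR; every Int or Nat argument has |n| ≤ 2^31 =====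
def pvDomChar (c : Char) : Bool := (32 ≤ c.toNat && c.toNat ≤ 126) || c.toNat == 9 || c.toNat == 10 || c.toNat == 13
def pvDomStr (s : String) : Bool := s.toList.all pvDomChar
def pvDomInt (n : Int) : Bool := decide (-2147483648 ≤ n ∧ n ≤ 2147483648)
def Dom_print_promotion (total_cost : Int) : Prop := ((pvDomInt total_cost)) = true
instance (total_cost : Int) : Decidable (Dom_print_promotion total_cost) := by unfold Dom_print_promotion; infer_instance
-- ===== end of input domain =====

-- B replaces A's stateful while loop by one floordiv/mod by MAXIMUM and a remainder case split (simpler).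

def pvMINIMUM : Int := 500
def pvMIDRANGE : Int := 700
def pvMAXIMUM : Int := 1200
def pvFREE_ICECREAM : String := "Free ice cream cone = "
def pvFREE_CAKE : String := "Free chocolate cake = "
def pvNO_GIFT : String := "Thank you and see you next time"

-- ===== PORT A =====
-- A's while loop, with a fuel guard only to make it total; 5 always suffices
-- (the loop reaches temp_cost = 0 within at most 4 checks, as the proofs below compute).
def pp_loop : Nat → Int → Int → Int → Int × Int
  | 0, _, num_icecream, num_cake => (num_icecream, num_cake)
  | Nat.succ fuel, temp_cost, num_icecream, num_cake =>
    if temp_cost ≠ 0 then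
      if PySem.Int.floordiv temp_cost pvMAXIMUM ≥ 1 then
        let ni := num_icecream + PySem.Int.floordiv temp_cost pvMAXIMUM
        let nc := num_cake + PySem.Int.floordiv temp_cost pvMAXIMUM
        pp_loop fuel (temp_cost - ni * pvMAXIMUM) ni nc
      else if PySem.Int.floordiv temp_cost pvMIDRANGE ≥ 1 then
        let nc := num_cake + PySem.Int.floordiv temp_cost pvMIDRANGE
        pp_loop fuel (temp_cost - nc * pvMIDRANGE) num_icecream nc
      else if PySem.Int.floordiv temp_cost pvMINIMUM ≥ 1 then
        let ni := num_icecream + PySem.Int.floordiv temp_cost pvMINIMUM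
        pp_loop fuel (temp_cost - ni * pvMAXIMUM) ni num_cake
      else
        pp_loop fuel 0 num_icecream num_cake
    else (num_icecream, num_cake)

def print_promotion (total_cost : Int) : String :=
  if total_cost ≥ pvMINIMUM then
    let p := pp_loop 5 total_cost 0 0
    if total_cost ≥ pvMAXIMUM then
      pvFREE_ICECREAM ++ PySem.Int.toStr p.1 ++ " and " ++ pvFREE_CAKE ++ PySem.Int.toStr p.2
    else if total_cost ≥ pvMIDRANGE then
      pvFREE_CAKE ++ PySem.Int.toStr p.2
    else
      pvFREE_ICECREAM ++ PySem.Int.toStr p.1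
  else pvNO_GIFT

-- ===== PORT B =====
def print_promotion_alt (total_cost : Int) : String :=
  if total_cost < pvMINIMUM then pvNO_GIFT
  else if total_cost ≥ pvMAXIMUM then
    let q := PySem.Int.floordiv total_cost pvMAXIMUM
    let r := PySem.Int.mod total_cost pvMAXIMUM
    let num_cake := if r ≥ pvMIDRANGE then q + 1 else q
    let num_icecream := if pvMIDRANGE > r ∧ r ≥ pvMINIMUM then q + 1 else q
    pvFREE_ICECREAM ++ PySem.Int.toStr num_icecream ++ " and " ++ pvFREE_CAKE ++ PySem.Int.toStr num_cake
  else if total_cost ≥ pvMIDRANGE then pvFREE_CAKE ++ PySem.Int.toStr 1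
  else pvFREE_ICECREAM ++ PySem.Int.toStr 1

-- ===== PRECONDITION & SPEC =====
def Spec_print_promotion (total_cost : Int) (out : String) : Prop := out = print_promotion_alt total_cost
instance (total_cost : Int) (out : String) : Decidable (Spec_print_promotion total_cost out) := by unfold Spec_print_promotion; infer_instance

-- ===== CLAIM (what is proved, stated in full; the proofs are below) =====
def Claim_equal_print_promotion : Prop := ∀ (total_cost : Int), Dom_print_promotion total_cost → Spec_print_promotion total_cost (print_promotion total_cost)

-- ===== LEMMAS AND PROOFS =====

theorem cond1200 (a : Int) : (1 ≤ PySem.Int.floordiv a 1200) ↔ 1200 ≤ a := by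
  rw [PySem.Int.le_floordiv_iff_mul_le (by norm_num), one_mul]

theorem cond700 (a : Int) : (1 ≤ PySem.Int.floordiv a 700) ↔ 700 ≤ a := by
  rw [PySem.Int.le_floordiv_iff_mul_le (by norm_num), one_mul]

theorem cond500 (a : Int) : (1 ≤ PySem.Int.floordiv a 500) ↔ 500 ≤ a := by
  rw [PySem.Int.le_floordiv_iff_mul_le (by norm_num), one_mul]

-- one unfolding of the loop when temp_cost < MAXIMUM, divisions resolved to arithmetic
theorem pp_loop_step (f : Nat) (t ic ck : Int) (hlt : t < 1200) :
    pp_loop (f + 1) t ic ck =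
      if t ≠ 0 then
        if 700 ≤ t then pp_loop f (t - (ck + 1) * 700) ic (ck + 1)
        else if 500 ≤ t then pp_loop f (t - (ic + 1) * 1200) (ic + 1) ck
        else pp_loop f 0 ic ck
      else (ic, ck) := by
  simp only [pp_loop, pvMAXIMUM, pvMIDRANGE, pvMINIMUM, ge_iff_le, cond1200, cond700, cond500]
  split_ifs <;>
    first
    | rfl
    | omega
    | (have hd : PySem.Int.floordiv t 700 = 1 := by
         rw [PySem.Int.floordiv_eq_iff_of_pos (by norm_num)]; omega
       rw [hd])
    | (have hd : PySem.Int.floordiv t 500 = 1 := by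
         rw [PySem.Int.floordiv_eq_iff_of_pos (by norm_num)]; omega
       rw [hd])

-- one unfolding of the loop when temp_cost ≥ MAXIMUM: the first branch fires
theorem pp_loop_stepbig (f : Nat) (t ic ck : Int) (h : 1200 ≤ t) :
    pp_loop (f + 1) t ic ck =
      pp_loop f (t - (ic + PySem.Int.floordiv t 1200) * 1200)
        (ic + PySem.Int.floordiv t 1200) (ck + PySem.Int.floordiv t 1200) := by
  simp only [pp_loop, pvMAXIMUM, ge_iff_le, cond1200]
  rw [if_pos (by omega), if_pos h]

theorem pp_loop_stop (f : Nat) (t ic ck : Int) (h : t < 500) :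
    pp_loop (f + 2) t ic ck = (ic, ck) := by
  by_cases hz : t = 0
  · simp [pp_loop, hz]
  · rw [pp_loop_step (f + 1) t ic ck (by omega),
        if_pos hz, if_neg (by omega), if_neg (by omega)]
    simp [pp_loop]

theorem pp_loop_icecream (f : Nat) (t ic ck : Int) (hic : 0 ≤ ic) (h0 : 500 ≤ t) (h1 : t < 700) :
    pp_loop (f + 3) t ic ck = (ic + 1, ck) := by
  rw [pp_loop_step (f + 2) t ic ck (by omega),
      if_pos (by omega), if_neg (by omega), if_pos h0]
  exact pp_loop_stop f _ _ _ (by nlinarith)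

theorem pp_loop_cake (f : Nat) (t ic ck : Int) (hck : 0 ≤ ck) (h0 : 700 ≤ t) (h1 : t < 1200) :
    pp_loop (f + 3) t ic ck = (ic, ck + 1) := by
  rw [pp_loop_step (f + 2) t ic ck h1, if_pos (by omega), if_pos h0]
  exact pp_loop_stop f _ _ _ (by nlinarith)

theorem pp_loop_big (t : Int) (h0 : 1200 ≤ t) :
    pp_loop 5 t 0 0 =
      ((if PySem.Int.mod t 1200 < 700 ∧ 500 ≤ PySem.Int.mod t 1200
          then PySem.Int.floordiv t 1200 + 1 else PySem.Int.floordiv t 1200),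
       (if 700 ≤ PySem.Int.mod t 1200
          then PySem.Int.floordiv t 1200 + 1 else PySem.Int.floordiv t 1200)) := by
  have hqr : PySem.Int.floordiv t 1200 * 1200 + PySem.Int.mod t 1200 = t :=
    PySem.Int.floordiv_mul_add_mod t 1200
  have hr0 : 0 ≤ PySem.Int.mod t 1200 := PySem.Int.mod_nonneg t (by norm_num)
  have hr1 : PySem.Int.mod t 1200 < 1200 := PySem.Int.mod_lt t (by norm_num)
  have hq1 : 1 ≤ PySem.Int.floordiv t 1200 := (cond1200 t).mpr h0
  rw [show (5 : Nat) = 4 + 1 from rfl, pp_loop_stepbig 4 t 0 0 h0, zero_add,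
      show t - PySem.Int.floordiv t 1200 * 1200 = PySem.Int.mod t 1200 from by omega]
  rcases lt_or_ge (PySem.Int.mod t 1200) 500 with hc | hc
  · rw [show (4 : Nat) = 2 + 2 from rfl, pp_loop_stop 2 _ _ _ hc,
        if_neg (by omega), if_neg (by omega)]
  · rcases lt_or_ge (PySem.Int.mod t 1200) 700 with hc2 | hc2
    · rw [show (4 : Nat) = 1 + 3 from rfl, pp_loop_icecream 1 _ _ _ (by omega) hc hc2,
          if_pos (by omega), if_neg (by omega)]
    · rw [show (4 : Nat) = 1 + 3 from rfl, pp_loop_cake 1 _ _ _ (by omega) hc2 (by omega),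
          if_neg (by omega), if_pos hc2]

-- ===== VERDICT (by name: the statement is the Claim_ definition above) =====
theorem print_promotion_spec : Claim_equal_print_promotion := by
  intro t _
  show print_promotion t = print_promotion_alt t
  simp only [print_promotion, print_promotion_alt, pvMINIMUM, pvMIDRANGE, pvMAXIMUM,
    ge_iff_le, gt_iff_lt]
  rcases lt_or_ge t 500 with h | h
  · rw [if_neg (show ¬ 500 ≤ t by omega), if_pos (show t < 500 from h)]
  · rw [if_pos h, if_neg (show ¬ t < 500 by omega)]
    rcases lt_or_ge t 1200 with hm | hm
    · rw [if_neg (show ¬ 1200 ≤ t by omega), if_neg (show ¬ 1200 ≤ t by omega)]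
      rcases lt_or_ge t 700 with hmid | hmid
      · rw [if_neg (show ¬ 700 ≤ t by omega), if_neg (show ¬ 700 ≤ t by omega),
            show (5 : Nat) = 2 + 3 from rfl, pp_loop_icecream 2 t 0 0 le_rfl h hmid]
        norm_num
      · rw [if_pos (show 700 ≤ t from hmid), if_pos (show 700 ≤ t from hmid),
            show (5 : Nat) = 2 + 3 from rfl, pp_loop_cake 2 t 0 0 le_rfl hmid hm]
        norm_num
    · rw [if_pos (show 1200 ≤ t from hm), if_pos (show 1200 ≤ t from hm), pp_loop_big t hm]
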